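-- pv_equiv track=rewrite | github.com/yakinorinori/Static-Fingerprint-Recognition | main.py | split_on_three_consecutive
-- ===== SOURCE A (Python) =====
-- def split_on_three_consecutive(input_characters):
--     current_char = None
--     count = 0
--     temp_list = []
--     final_list = []
--
--     for char in input_characters:
--         if char == current_char:
--             count += 1
--         else:
--             count = 1
--             current_char = char
--         temp_list.append(char)
--
--         if count == 3:
--             final_list.append(temp_list)
--             temp_list = []
--             count = 0
--
--     if temp_list:
--         final_list.append(temp_list)
--
--     return final_list
-- ===== SOURCE B (Python) =====
-- def split_on_three_consecutive(input_characters):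
--     # Run-based reformulation: scan maximal runs of equal elements; a run of
--     # length L closes the carried buffer with its first 3 elements, emits the
--     # further full triples, and carries the L % 3 leftover.
--     n = len(input_characters)
--     result = []
--     buffer = []
--     i = 0
--     while i < n:
--         j = i
--         while j < n and input_characters[j] == input_characters[i]:
--             j += 1
--         g = input_characters[i:j]
--         if len(g) >= 3:
--             result.append(buffer + g[:3])
--             buffer = []
--             k = 3
--             while k + 3 <= len(g):
--                 result.append(g[k:k + 3])
--                 k += 3
--             buffer = g[k:]
--         else:
--             buffer.extend(g)
--         i = j
--     if buffer:
--         result.append(buffer)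
--     return result
-- ===== Notes on version B (the rewrite author's own statement) =====
-- stated objective: alternative
-- what changed: B scans maximal runs of equal elements and emits chunks by slicing each run (buffer + first 3, further full triples, carry the L mod 3 leftover), instead of A's per-character counter with mod-3 reset.
import Mathlib
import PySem

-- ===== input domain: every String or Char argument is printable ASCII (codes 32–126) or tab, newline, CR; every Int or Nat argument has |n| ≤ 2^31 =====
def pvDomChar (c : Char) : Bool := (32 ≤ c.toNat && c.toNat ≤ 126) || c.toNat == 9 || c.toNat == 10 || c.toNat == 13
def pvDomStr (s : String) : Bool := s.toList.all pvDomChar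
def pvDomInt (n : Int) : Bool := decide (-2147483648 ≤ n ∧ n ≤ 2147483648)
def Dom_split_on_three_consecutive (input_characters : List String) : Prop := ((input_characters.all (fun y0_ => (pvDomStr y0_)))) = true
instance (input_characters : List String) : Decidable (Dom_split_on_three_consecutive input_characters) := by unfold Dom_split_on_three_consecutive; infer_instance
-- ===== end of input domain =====

-- B replaces A's per-character counter (mod-3 reset) with a scan over maximal
-- runs of equal elements that slices each run into chunks; alternative
-- decomposition of the same O(n) task, proved to return the same value.

-- ===== PORT A =====
-- loop state: (current_char, count, temp_list, final_list)
def pvStepA (st : Option String × Nat × List String × List (List String)) (char : String) :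
    Option String × Nat × List String × List (List String) :=
  let (current_char, count, temp_list, final_list) := st
  let (count, current_char) :=
    if some char = current_char then (count + 1, current_char) else (1, some char)
  let temp_list := temp_list ++ [char]
  if count = 3 then (current_char, 0, [], final_list ++ [temp_list])
  else (current_char, count, temp_list, final_list)

-- the trailing "if temp_list: final_list.append(temp_list)"
def pvFinishA (st : Option String × Nat × List String × List (List String)) :
    List (List String) :=
  st.2.2.2 ++ (if st.2.2.1 = [] then [] else [st.2.2.1])

def split_on_three_consecutive (input_characters : List String) : List (List String) :=
  pvFinishA (input_characters.foldl pvStepA (none, 0, [], []))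

-- ===== PORT B =====
-- the inner "while k + 3 <= len(g)" loop on the part of the run after its
-- first three elements: (emitted triples, leftover buffer g[k:])
def pvMid (g : List String) : List (List String) × List String :=
  if 3 ≤ g.length then
    let p := pvMid (g.drop 3)
    (g.take 3 :: p.1, p.2)
  else ([], g)
termination_by g.length
decreasing_by simp; omega

-- the outer "while i < n" loop: one iteration per maximal run
def pvRunSplit (buffer : List String) (xs : List String) : List (List String) :=
  match xs with
  | [] => if buffer = [] then [] else [buffer]
  | c :: rest =>
    let g := c :: rest.takeWhile (fun x => decide (x = c))
    let rest' := rest.dropWhile (fun x => decide (x = c))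
    if 3 ≤ g.length then
      let p := pvMid (g.drop 3)
      (buffer ++ g.take 3) :: (p.1 ++ pvRunSplit p.2 rest')
    else pvRunSplit (buffer ++ g) rest'
termination_by xs.length
decreasing_by
  all_goals
    simpa using Nat.lt_succ_of_le (List.length_dropWhile_le (fun x => decide (x = c)) rest)

def split_on_three_consecutive_alt (input_characters : List String) : List (List String) :=
  pvRunSplit [] input_characters

-- ===== PRECONDITION & SPEC =====
def Spec_split_on_three_consecutive (input_characters : List String) (out : List (List String)) : Prop := out = split_on_three_consecutive_alt input_characters
instance (input_characters : List String) (out : List (List String)) : Decidable (Spec_split_on_three_consecutive input_characters out) := by unfold Spec_split_on_three_consecutive; infer_instance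

-- ===== CLAIM (what is proved, stated in full; the proofs are below) =====
def Claim_equal_split_on_three_consecutive : Prop := ∀ (input_characters : List String), Dom_split_on_three_consecutive input_characters → Spec_split_on_three_consecutive input_characters (split_on_three_consecutive input_characters)

-- ===== LEMMAS AND PROOFS =====

theorem pv_head_dropWhile {α : Type} (p : α → Bool) :
    ∀ (l : List α) (a : α), (List.dropWhile p l).head? = some a → p a = false := by
  intro l
  induction l with
  | nil => intro a h; simp [List.dropWhile] at h
  | cons x xs ih =>
      intro a h
      by_cases hx : p x
      · exact ih a (by simpa [List.dropWhile, hx] using h)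
      · rw [List.dropWhile_cons_of_neg (by simpa using hx)] at h
        simp at h
        subst h
        simpa using hx

-- a maximal run is a replicate of its head
theorem pv_run_replicate (c : String) (l : List String) :
    c :: l.takeWhile (fun x => decide (x = c)) =
      List.replicate ((l.takeWhile (fun x => decide (x = c))).length + 1) c := by
  have h : l.takeWhile (fun x => decide (x = c)) =
      List.replicate ((l.takeWhile (fun x => decide (x = c))).length) c := by
    apply List.eq_replicate_of_mem
    intro b hb
    simpa using List.mem_takeWhile_imp hb
  calc c :: l.takeWhile (fun x => decide (x = c))
      = c :: List.replicate ((l.takeWhile (fun x => decide (x = c))).length) c := by rw [← h]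
    _ = _ := by rw [List.replicate_succ]

-- one step of A on the first character of a (fresh) run
theorem pvStepA_fresh (cc : Option String) (count : Nat) (temp : List String)
    (F : List (List String)) (c : String) (h : cc = some c → count = 0) :
    pvStepA (cc, count, temp, F) c = (some c, 1, temp ++ [c], F) := by
  by_cases hc : some c = cc
  · subst hc
    have : count = 0 := h rfl
    subst this
    simp [pvStepA]
  · simp [pvStepA, hc]

-- A on a whole run of c, starting right after a split point
theorem pvFoldA_run3 (c : String) : ∀ (M : Nat) (F : List (List String)),
    List.foldl pvStepA (some c, 0, [], F) (List.replicate M c) =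
      (some c, M % 3, List.replicate (M % 3) c,
        F ++ List.replicate (M / 3) (List.replicate 3 c)) := by
  intro M
  induction M using Nat.strong_induction_on with
  | _ M ih =>
    intro F
    have s1 : pvStepA (some c, 0, [], F) c = (some c, 1, [c], F) := by
      simp [pvStepA]
    have s2 : pvStepA (some c, 1, [c], F) c = (some c, 2, [c, c], F) := by
      simp [pvStepA]
    have s3 : pvStepA (some c, 2, [c, c], F) c = (some c, 0, [], F ++ [[c, c, c]]) := by
      simp [pvStepA]
    match M with
    | 0 => simp
    | 1 =>
        simp only [List.replicate_succ, List.replicate_zero, List.foldl_cons, List.foldl_nil]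
        rw [s1]
        simp
    | 2 =>
        simp only [List.replicate_succ, List.replicate_zero, List.foldl_cons, List.foldl_nil]
        rw [s1, s2]
        simp
    | (m + 3) =>
        have h3 : List.replicate (m + 3) c = c :: c :: c :: List.replicate m c := by
          simp [List.replicate_succ]
        rw [h3]
        simp only [List.foldl_cons]
        rw [s1, s2, s3, ih m (by omega) (F ++ [[c, c, c]])]
        have e1 : (m + 3) % 3 = m % 3 := by omega
        have e2 : (m + 3) / 3 = m / 3 + 1 := by omega
        rw [e1, e2]
        have e3 : List.replicate (m / 3 + 1) (List.replicate 3 c) =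
            [c, c, c] :: List.replicate (m / 3) (List.replicate 3 c) := by
          rw [List.replicate_succ]; rfl
        rw [e3]
        simp [List.replicate_succ]

-- A on a whole run of length L ≥ 1 entered from an arbitrary compatible state
theorem pvFoldA_enter (c : String) (L : Nat) (hL : 1 ≤ L) (cc : Option String)
    (count : Nat) (temp : List String) (F : List (List String))
    (h : cc = some c → count = 0) :
    List.foldl pvStepA (cc, count, temp, F) (List.replicate L c) =
      if L < 3 then (some c, L, temp ++ List.replicate L c, F)
      else (some c, L % 3, List.replicate (L % 3) c,
        F ++ (temp ++ List.replicate 3 c) :: List.replicate ((L - 3) / 3) (List.replicate 3 c)) := by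
  match L with
  | 1 =>
      simp only [List.replicate_succ, List.replicate_zero, List.foldl_cons, List.foldl_nil]
      rw [pvStepA_fresh cc count temp F c h]
      simp
  | 2 =>
      simp only [List.replicate_succ, List.replicate_zero, List.foldl_cons, List.foldl_nil]
      rw [pvStepA_fresh cc count temp F c h]
      have s2 : pvStepA (some c, 1, temp ++ [c], F) c = (some c, 2, temp ++ [c, c], F) := by
        simp [pvStepA]
      rw [s2]
      simp
  | (m + 3) =>
      have h3 : List.replicate (m + 3) c = c :: c :: c :: List.replicate m c := by
        simp [List.replicate_succ]
      rw [h3]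
      simp only [List.foldl_cons]
      rw [pvStepA_fresh cc count temp F c h]
      have s2 : pvStepA (some c, 1, temp ++ [c], F) c = (some c, 2, temp ++ [c, c], F) := by
        simp [pvStepA]
      have s3 : pvStepA (some c, 2, temp ++ [c, c], F) c =
          (some c, 0, [], F ++ [temp ++ [c, c, c]]) := by
        simp [pvStepA]
      rw [s2, s3, pvFoldA_run3 c m (F ++ [temp ++ [c, c, c]])]
      have e1 : (m + 3) % 3 = m % 3 := by omega
      have e2 : (m + 3) - 3 = m := by omega
      have hnlt : ¬ (m + 3 < 3) := by omega
      rw [if_neg hnlt, e1, e2]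
      simp [List.replicate_succ]

-- B's inner loop on a replicate
theorem pvMid_replicate (c : String) : ∀ (M : Nat),
    pvMid (List.replicate M c) =
      (List.replicate (M / 3) (List.replicate 3 c), List.replicate (M % 3) c) := by
  intro M
  induction M using Nat.strong_induction_on with
  | _ M ih =>
    by_cases hM : 3 ≤ M
    · have hlen : 3 ≤ (List.replicate M c).length := by simpa using hM
      rw [pvMid, if_pos hlen]
      have hd : (List.replicate M c).drop 3 = List.replicate (M - 3) c := by
        simp
      have ht : (List.replicate M c).take 3 = List.replicate 3 c := by
        simp [Nat.min_eq_left hM]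
      rw [hd, ht, ih (M - 3) (by omega)]
      have e1 : M / 3 = (M - 3) / 3 + 1 := by omega
      have e2 : M % 3 = (M - 3) % 3 := by omega
      rw [e1, e2]
      simp [List.replicate_succ]
    · rw [pvMid, if_neg (by simpa using hM)]
      have : M / 3 = 0 := by omega
      simp [this, Nat.mod_eq_of_lt (by omega : M < 3)]

-- B's cons case, evaluated on the run decomposition
theorem pvRunSplit_cons_run (buffer : List String) (c : String) (rest : List String) :
    pvRunSplit buffer (c :: rest) =
      if (rest.takeWhile (fun x => decide (x = c))).length + 1 < 3 then
        pvRunSplit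
          (buffer ++ List.replicate ((rest.takeWhile (fun x => decide (x = c))).length + 1) c)
          (rest.dropWhile (fun x => decide (x = c)))
      else
        (buffer ++ List.replicate 3 c) ::
          (List.replicate
              (((rest.takeWhile (fun x => decide (x = c))).length + 1 - 3) / 3)
              (List.replicate 3 c) ++
            pvRunSplit
              (List.replicate (((rest.takeWhile (fun x => decide (x = c))).length + 1) % 3) c)
              (rest.dropWhile (fun x => decide (x = c)))) := by
  rw [pvRunSplit.eq_def]
  dsimp only
  rw [pv_run_replicate c rest, List.length_replicate]
  set k := (rest.takeWhile (fun x => decide (x = c))).length with hk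
  by_cases h3 : 3 ≤ k + 1
  · rw [if_pos h3, if_neg (by omega)]
    rw [List.drop_replicate, List.take_replicate, Nat.min_eq_left h3]
    rw [pvMid_replicate]
    have e : (k + 1 - 3) % 3 = (k + 1) % 3 := by omega
    rw [e]
  · rw [if_neg h3, if_pos (by omega)]

-- main invariant: at any run boundary, A's remaining computation from a state
-- whose pending temp_list is B's buffer equals F ++ B's remaining computation
theorem pvMain : ∀ (n : Nat) (xs : List String), xs.length ≤ n →
    ∀ (cc : Option String) (count : Nat) (temp : List String) (F : List (List String)),
    (∀ c, xs.head? = some c → cc = some c → count = 0) →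
    pvFinishA (List.foldl pvStepA (cc, count, temp, F) xs) = F ++ pvRunSplit temp xs := by
  intro n
  induction n with
  | zero =>
      intro xs hxs cc count temp F _
      match xs with
      | [] => by_cases ht : temp = [] <;> simp [pvRunSplit, pvFinishA, ht]
      | x :: xs' => simp at hxs
  | succ n ih =>
      intro xs hxs cc count temp F hfresh
      match xs with
      | [] =>
          by_cases ht : temp = [] <;> simp [pvRunSplit, pvFinishA, ht]
      | c :: rest =>
          rw [pvRunSplit_cons_run]
          have hg := pv_run_replicate c rest
          have hsplit : c :: rest =
              List.replicate ((rest.takeWhile (fun x => decide (x = c))).length + 1) c ++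
                rest.dropWhile (fun x => decide (x = c)) := by
            rw [← hg]
            simp
          conv_lhs => rw [hsplit]
          set k := (rest.takeWhile (fun x => decide (x = c))).length with hk
          set r := rest.dropWhile (fun x => decide (x = c)) with hdw
          have hr_len : r.length ≤ n := by
            have h2 : r.length ≤ rest.length := by
              rw [hdw]; exact List.length_dropWhile_le _ rest
            simp at hxs
            omega
          have hne : ∀ c', r.head? = some c' → c' ≠ c := by
            intro c' hc'
            have hpc : (fun x => decide (x = c)) c' = false :=
              pv_head_dropWhile (fun x => decide (x = c)) rest c' (by rw [← hdw]; exact hc')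
            simpa using hpc
          rw [List.foldl_append,
            pvFoldA_enter c (k + 1) (by omega) cc count temp F (hfresh c rfl)]
          by_cases hlt : k + 1 < 3
          · rw [if_pos hlt, if_pos hlt]
            exact ih r hr_len (some c) (k + 1) (temp ++ List.replicate (k + 1) c) F
              (fun c' hc' hcc => absurd (Option.some_injective _ hcc).symm (hne c' hc'))
          · rw [if_neg hlt, if_neg hlt]
            rw [ih r hr_len (some c) ((k + 1) % 3) (List.replicate ((k + 1) % 3) c)
              (F ++ (temp ++ List.replicate 3 c) ::
                List.replicate ((k + 1 - 3) / 3) (List.replicate 3 c))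
              (fun c' hc' hcc => absurd (Option.some_injective _ hcc).symm (hne c' hc'))]
            simp [List.append_assoc]

-- ===== VERDICT (by name: the statement is the Claim_ definition above) =====
theorem split_on_three_consecutive_spec : Claim_equal_split_on_three_consecutive := by
  intro xs _
  unfold Spec_split_on_three_consecutive split_on_three_consecutive split_on_three_consecutive_alt
  exact pvMain xs.length xs le_rfl none 0 [] [] (by intro c _ h; cases h)
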